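-- pv_equiv track=rewrite | github.com/Sarah-qi/COMP9021 | Sample_Exam_Questions/practices/practice_5.py | f
-- ===== SOURCE A (Python) =====
-- def f(n):
--     '''
--     >>> f(2004280)
--     (0, 0, 0)
--     >>> f(1)
--     (1, 0, 2)
--     >>> f(9)
--     (9, 8, 0)
--     >>> f(5)
--     (5, 4, 6)
--     >>> f(23211)
--     (113, 0, 224)
--     >>> f(49909929)
--     (99999, 88888, 0)
--     >>> f(45445030303070033)
--     (33333557, 22222446, 44444668)
--     >>> f(889287767862576235673458)
--     (33555777779, 22444666668, 44666888880)
--     '''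
--     # return tuple()
--     # REPLACE THE RETURN STATEMENT ABOVE WITH YOUR CODE
--     star_n = ''
--     add_n = ''
--     minus_n = ''
--     for i in str(n):
--         if int(i) % 2 != 0:
--             star_n += i
--     star_n = sorted(star_n)
--     star_n = ''.join(star_n)
--     if star_n == '':
--         return (0,0,0)
--     else:
--         for i in star_n:
--             if int(i) + 1 == 10:
--                 add_n += str(0)
--             else:
--                 add_n += str(int(i)+1)
--             if star_n[0] == '1':
--                 minus_n = 0
--             else:
--                 minus_n += str(int(i)-1)
--
--         return(int(star_n), int(minus_n), int(add_n))
-- ===== SOURCE B (Python) =====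
-- def f(n):
--     s = str(n)
--     cnt = {d: s.count(d) for d in '13579'}
--     star = ''.join(d * cnt[d] for d in '13579')
--     if not star:
--         return (0, 0, 0)
--     add = int(''.join(str((int(d) + 1) % 10) * cnt[d] for d in '13579'))
--     minus = 0 if cnt['1'] else int(''.join(str(int(d) - 1) * cnt[d] for d in '13579'))
--     return (int(star), minus, add)
-- ===== Notes on version B (the rewrite author's own statement) =====
-- stated objective: alternative
-- what changed: B replaces A's filter-then-sort over the digit string (and its char-by-char string building with an in-loop head test) by a single histogram of the five odd digits, emitting each of the three digit strings directly in ascending digit order with no sort.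
-- outside the precondition, e.g. on f(-13): A raises ValueError, B returns (13, 0, 24)
import Mathlib
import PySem

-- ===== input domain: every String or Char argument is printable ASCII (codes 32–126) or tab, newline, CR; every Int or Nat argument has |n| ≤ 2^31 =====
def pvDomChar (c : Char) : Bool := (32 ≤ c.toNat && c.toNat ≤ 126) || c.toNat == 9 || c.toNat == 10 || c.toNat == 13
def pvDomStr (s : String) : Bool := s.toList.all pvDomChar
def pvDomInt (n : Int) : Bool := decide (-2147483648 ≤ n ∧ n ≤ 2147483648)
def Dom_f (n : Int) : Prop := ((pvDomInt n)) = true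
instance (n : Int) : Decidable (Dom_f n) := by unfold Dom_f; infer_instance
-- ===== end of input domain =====

-- B replaces A's filter-then-sort over the digit string by a histogram over the five odd
-- digits: no sort, each of the three digit strings is emitted directly in ascending order
-- (objective: alternative/idiomatic; same O(n) cost on machine ints here).

-- int(i) for a one-character string i (both Pythons call int() on single digit characters)
def pyIntOfChar (c : Char) : Int := (PySem.Int.ofChars? [c]).getD 0

-- ===== PORT A =====
def f (n : Int) : Int × Int × Int :=
  let s := PySem.Int.toChars n                      -- str(n)
  -- for i in str(n): if int(i) % 2 != 0: star_n += i
  let star0 := s.foldl (fun acc i => if PySem.Int.mod (pyIntOfChar i) 2 ≠ 0 then acc ++ [i] else acc) ([] : List Char)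
  -- star_n = ''.join(sorted(star_n))   (characters compared by code point)
  let star := PySem.List.sorted star0 (fun c => c.toNat) false
  if star = [] then (0, 0, 0)
  else
    -- the loop carries add_n (a string) and minus_n (a string, overwritten by the int 0
    -- whenever star_n[0] == '1'); the Sum.inl-in-else branch is unreachable in Python
    -- (int += str would be a TypeError) because the guard star_n[0] == '1' is loop-invariant
    let st := star.foldl
      (fun (p : List Char × (Int ⊕ List Char)) i =>
        (p.1 ++ (if pyIntOfChar i + 1 = 10 then PySem.Int.toChars 0 else PySem.Int.toChars (pyIntOfChar i + 1)),
         if PySem.List.pyGet? star 0 = some '1' then Sum.inl 0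
         else match p.2 with
           | Sum.inl z => Sum.inl z
           | Sum.inr m => Sum.inr (m ++ PySem.Int.toChars (pyIntOfChar i - 1))))
      (([], Sum.inr []) : List Char × (Int ⊕ List Char))
    ((PySem.Int.ofChars? star).getD 0,
     (match st.2 with
      | Sum.inl z => z
      | Sum.inr m => (PySem.Int.ofChars? m).getD 0),
     (PySem.Int.ofChars? st.1).getD 0)

-- ===== PORT B =====
-- the five odd digits, ascending (the string '13579' Source B iterates over)
def pvOdds : List Char := ['1', '3', '5', '7', '9']

def f_alt (n : Int) : Int × Int × Int :=
  let s := PySem.Int.toChars n                      -- s = str(n)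
  let cnt : Char → Nat := fun d => PySem.Chars.count s [d]      -- cnt = {d: s.count(d) for d in '13579'}
  -- star = ''.join(d * cnt[d] for d in '13579')
  let star := pvOdds.foldl (fun acc d => acc ++ PySem.List.pyRepeat [d] (cnt d)) ([] : List Char)
  if star = [] then (0, 0, 0)
  else
    -- add = int(''.join(str((int(d) + 1) % 10) * cnt[d] for d in '13579'))
    let add := pvOdds.foldl (fun acc d => acc ++ PySem.List.pyRepeat (PySem.Int.toChars (PySem.Int.mod (pyIntOfChar d + 1) 10)) (cnt d)) ([] : List Char)
    -- minus = 0 if cnt['1'] else int(''.join(str(int(d) - 1) * cnt[d] for d in '13579'))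
    let minus : Int := if cnt '1' ≠ 0 then 0
      else (PySem.Int.ofChars? (pvOdds.foldl (fun acc d => acc ++ PySem.List.pyRepeat (PySem.Int.toChars (pyIntOfChar d - 1)) (cnt d)) ([] : List Char))).getD 0
    ((PySem.Int.ofChars? star).getD 0, minus, (PySem.Int.ofChars? add).getD 0)

-- ===== PRECONDITION & SPEC =====
-- Pre_f excludes negative n: there str(n) starts with '-' and A's int(i) raises ValueError.
def Pre_f (n : Int) : Prop := 0 ≤ n
instance (n : Int) : Decidable (Pre_f n) := by unfold Pre_f; infer_instance
def pvWitness_f : Int := 23211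

def Spec_f (n : Int) (out : Int × Int × Int) : Prop := out = f_alt n
instance (n : Int) (out : Int × Int × Int) : Decidable (Spec_f n out) := by unfold Spec_f; infer_instance

-- ===== CLAIM (what is proved, stated in full; the proofs are below) =====
def Claim_equal_f : Prop := ∀ (n : Int), Dom_f n → Pre_f n → Spec_f n (f n)


-- ===== LEMMAS AND PROOFS =====

-- A's filter predicate, as the Bool test List.filter uses
def pvPB : Char → Bool := fun c => decide (PySem.Int.mod (pyIntOfChar c) 2 ≠ 0)

-- the histogram-built list of odd digits in ascending order (what both stars reduce to)
def pvFlat (s : List Char) : List Char := pvOdds.flatMap (fun d => List.replicate (s.count d) d)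

def pvDigits : List Char := ['0', '1', '2', '3', '4', '5', '6', '7', '8', '9']

theorem pv_char_eq_of_toNat {c : Char} {m : Nat} (d : Char) (h : c.toNat = m) (hd : d.toNat = m) : c = d := by
  apply Char.ext
  apply UInt32.toNat_inj.mp
  show c.toNat = d.toNat
  omega

theorem pv_mem_digits_of_isDigit (c : Char) (h : c.isDigit = true) : c ∈ pvDigits := by
  simp only [Char.isDigit, Bool.and_eq_true, decide_eq_true_eq] at h
  obtain ⟨h1, h2⟩ := h
  have h1' : 48 ≤ c.toNat := h1
  have h2' : c.toNat ≤ 57 := h2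
  have hv : c.toNat = 48 ∨ c.toNat = 49 ∨ c.toNat = 50 ∨ c.toNat = 51 ∨ c.toNat = 52 ∨
      c.toNat = 53 ∨ c.toNat = 54 ∨ c.toNat = 55 ∨ c.toNat = 56 ∨ c.toNat = 57 := by omega
  rcases hv with h|h|h|h|h|h|h|h|h|h
  · simp [pvDigits, pv_char_eq_of_toNat '0' h (by decide)]
  · simp [pvDigits, pv_char_eq_of_toNat '1' h (by decide)]
  · simp [pvDigits, pv_char_eq_of_toNat '2' h (by decide)]
  · simp [pvDigits, pv_char_eq_of_toNat '3' h (by decide)]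
  · simp [pvDigits, pv_char_eq_of_toNat '4' h (by decide)]
  · simp [pvDigits, pv_char_eq_of_toNat '5' h (by decide)]
  · simp [pvDigits, pv_char_eq_of_toNat '6' h (by decide)]
  · simp [pvDigits, pv_char_eq_of_toNat '7' h (by decide)]
  · simp [pvDigits, pv_char_eq_of_toNat '8' h (by decide)]
  · simp [pvDigits, pv_char_eq_of_toNat '9' h (by decide)]

theorem pv_toChars_digits (n : Int) (hn : 0 ≤ n) (c : Char) (hc : c ∈ PySem.Int.toChars n) :
    c ∈ pvDigits := by
  unfold PySem.Int.toChars at hc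
  rw [if_neg (by omega)] at hc
  exact pv_mem_digits_of_isDigit c (Nat.isDigit_of_mem_toDigits (by norm_num) (by norm_num) hc)

theorem pv_count_go_singleton (d : Char) (l : List Char) : ∀ (fuel acc : Nat), l.length ≤ fuel →
    PySem.Chars.count.go [d] fuel l acc = acc + l.count d := by
  induction l with
  | nil => intro fuel acc _; cases fuel <;> simp [PySem.Chars.count.go]
  | cons h t ih =>
    intro fuel acc hf
    cases fuel with
    | zero => simp at hf
    | succ m =>
      have hm : t.length ≤ m := by simpa using hf
      by_cases hd : d = h
      · subst hd
        rw [show PySem.Chars.count.go [d] (m+1) (d :: t) acc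
              = PySem.Chars.count.go [d] m t (acc + 1) from by
            simp [PySem.Chars.count.go, List.isPrefixOf]]
        rw [ih m (acc+1) hm]
        simp only [List.count_cons_self]
        omega
      · have hpre : ([d].isPrefixOf (h :: t)) = false := by
          simp [List.isPrefixOf]
          exact hd
        rw [show PySem.Chars.count.go [d] (m+1) (h :: t) acc
              = PySem.Chars.count.go [d] m t acc from by
            simp [PySem.Chars.count.go, hpre]]
        rw [ih m acc hm]
        simp [Ne.symm hd]

theorem pv_chars_count_singleton (s : List Char) (d : Char) :
    PySem.Chars.count s [d] = s.count d := by
  simp only [PySem.Chars.count, List.isEmpty_cons, Bool.false_eq_true, ↓reduceIte]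
  simpa using pv_count_go_singleton d s s.length 0 le_rfl

theorem pv_count_flat (s : List Char) (a : Char) :
    (pvFlat s).count a = if a ∈ pvOdds then s.count a else 0 := by
  by_cases h1 : a = '1'; · subst h1; simp [pvFlat, pvOdds, List.count_append, List.count_replicate]
  by_cases h3 : a = '3'; · subst h3; simp [pvFlat, pvOdds, List.count_append, List.count_replicate]
  by_cases h5 : a = '5'; · subst h5; simp [pvFlat, pvOdds, List.count_append, List.count_replicate]
  by_cases h7 : a = '7'; · subst h7; simp [pvFlat, pvOdds, List.count_append, List.count_replicate]
  by_cases h9 : a = '9'; · subst h9; simp [pvFlat, pvOdds, List.count_append, List.count_replicate]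
  simp [pvFlat, pvOdds, List.count_append, List.count_replicate,
    Ne.symm h1, Ne.symm h3, Ne.symm h5, Ne.symm h7, Ne.symm h9, h1, h3, h5, h7, h9]

theorem pv_filter_perm_flat (s : List Char) (hs : ∀ c ∈ s, c ∈ pvDigits) :
    (s.filter pvPB).Perm (pvFlat s) := by
  rw [List.perm_iff_count]
  intro a
  rw [pv_count_flat]
  by_cases ha : a ∈ s
  · have hd := hs a ha
    fin_cases hd <;>
      first
        | (rw [List.count_filter (by decide)]; simp [pvOdds])
        | (rw [List.count_eq_zero.mpr (by
              intro hmem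
              exact absurd (List.mem_filter.mp hmem).2 (by decide))]
           simp [pvOdds])
  · have hc : s.count a = 0 := List.count_eq_zero.mpr ha
    have hcf : (s.filter pvPB).count a = 0 :=
      List.count_eq_zero.mpr (fun hmem => ha (List.mem_filter.mp hmem).1)
    simp [hc, hcf]

theorem pv_flat_pairwise (s : List Char) :
    List.Pairwise (fun a b => a.toNat ≤ b.toNat) (pvFlat s) := by
  rw [pvFlat, List.pairwise_flatMap]
  constructor
  · intro d _
    rw [List.pairwise_replicate]
    right; simp
  · simp only [pvOdds, List.pairwise_cons, List.mem_replicate]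
    refine ⟨?_, ?_, ?_, ?_, by simp⟩ <;>
      (intro d hd x hx y hy
       rcases hx with ⟨-, rfl⟩
       rcases hy with ⟨-, rfl⟩
       fin_cases hd <;> decide)

theorem pv_star_eq (s : List Char) (hs : ∀ c ∈ s, c ∈ pvDigits) :
    PySem.List.sorted (s.filter pvPB) (fun c => c.toNat) false = pvFlat s := by
  refine PySem.List.eq_of_perm_of_pairwise_le_of_injective (key := Char.toNat)
    (fun a b h => Char.ext (UInt32.toNat_inj.mp h))
    (((PySem.List.sorted_perm _ _ _).trans (pv_filter_perm_flat s hs)))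
    (PySem.List.sorted_pairwise _ _) (pv_flat_pairwise s)

-- flatMap of a singleton-valued function over a replicate
theorem pv_flatMap_replicate (k : Nat) (g : Char → List Char) (d c : Char) (h : g d = [c]) :
    (List.replicate k d).flatMap g = List.replicate k c := by
  induction k with
  | zero => simp
  | succ m ih => simp [List.replicate_succ, h, ih]

-- head of pvFlat is '1' exactly when the digit 1 occurs
theorem pv_flat_head (s : List Char) :
    (PySem.List.pyGet? (pvFlat s) 0 = some '1') ↔ s.count '1' ≠ 0 := by
  rw [PySem.List.pyGet?_zero]
  by_cases h1 : s.count '1' = 0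
  · simp only [h1, ne_eq, not_true_eq_false, iff_false]
    intro hc
    have hmem : '1' ∈ pvFlat s := List.mem_of_getElem? hc
    rw [pvFlat] at hmem
    simp only [List.mem_flatMap, List.mem_replicate] at hmem
    obtain ⟨d, hd, hcnt, rfl⟩ := hmem
    exact hcnt h1
  · obtain ⟨k, hk⟩ : ∃ k, s.count '1' = k + 1 := ⟨s.count '1' - 1, by omega⟩
    have : pvFlat s = '1' :: (List.replicate k '1' ++
        (['3','5','7','9'].flatMap (fun d => List.replicate (s.count d) d))) := by
      simp [pvFlat, pvOdds, hk, List.replicate_succ]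
    simp [this, h1]

theorem pv_foldl_const {α β : Type} (c : β) (l : List α) (hl : l ≠ []) :
    ∀ (init : β), l.foldl (fun _ _ => c) init = c := by
  induction l with
  | nil => exact absurd rfl hl
  | cons h t ih =>
    intro init
    rcases t with - | ⟨x, r⟩
    · rfl
    · exact ih (by simp) c

theorem pv_fold_minus_inr (g : Char → List Char) (l : List Char) :
    ∀ acc : List Char, l.foldl (fun m i =>
        match m with
        | Sum.inl (z : Int) => Sum.inl z
        | Sum.inr mm => Sum.inr (mm ++ g i)) (Sum.inr acc) = Sum.inr (acc ++ l.flatMap g) := by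
  induction l with
  | nil => intro acc; simp
  | cons h t ih =>
    intro acc
    simp only [List.foldl_cons, List.flatMap_cons]
    rw [ih (acc ++ g h)]
    simp

theorem f_spec_aux (n : Int) (hn : 0 ≤ n) : f n = f_alt n := by
  have hs : ∀ c ∈ PySem.Int.toChars n, c ∈ pvDigits := pv_toChars_digits n hn
  unfold f f_alt
  simp only [PySem.List.foldl_append_ite_eq_filter, List.nil_append]
  rw [show (fun x => decide (PySem.Int.mod (pyIntOfChar x) 2 ≠ 0)) = pvPB from rfl,
      pv_star_eq _ hs]
  have hrep : ∀ d : Char,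
      PySem.List.pyRepeat [d] ((PySem.Chars.count (PySem.Int.toChars n) [d] : Nat) : Int)
        = List.replicate ((PySem.Int.toChars n).count d) d := by
    intro d
    rw [PySem.List.pyRepeat_singleton, pv_chars_count_singleton]
    simp
  rw [PySem.List.foldl_append_eq_flatMap, List.nil_append]
  rw [show ((pvOdds.flatMap fun d =>
        PySem.List.pyRepeat [d] ((PySem.Chars.count (PySem.Int.toChars n) [d] : Nat) : Int)))
      = pvFlat (PySem.Int.toChars n) from by rw [pvFlat]; exact List.flatMap_congr (fun d _ => hrep d)]
  set s := PySem.Int.toChars n with hsdef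
  by_cases hemp : pvFlat s = []
  · rw [if_pos hemp, if_pos hemp]
  · rw [if_neg hemp, if_neg hemp]
    rw [PySem.List.foldl_prod_mk
      (f := fun acc i => acc ++ if pyIntOfChar i + 1 = 10 then PySem.Int.toChars 0
              else PySem.Int.toChars (pyIntOfChar i + 1))
      (g := fun m i => if PySem.List.pyGet? (pvFlat s) 0 = some '1' then Sum.inl (0 : Int)
              else match m with
                | Sum.inl z => Sum.inl z
                | Sum.inr mm => Sum.inr (mm ++ PySem.Int.toChars (pyIntOfChar i - 1)))]
    simp only [Prod.mk.injEq]
    refine ⟨trivial, ?_, ?_⟩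
    · -- minus component
      by_cases hc1 : s.count '1' = 0
      · have hcondF : (PySem.List.pyGet? (pvFlat s) 0 = some '1') = False :=
          eq_false (fun hc => (pv_flat_head s).mp hc hc1)
        have hcntF : (PySem.Chars.count s ['1'] ≠ 0) = False := by
          rw [pv_chars_count_singleton]; simp [hc1]
        simp only [hcondF, if_false, hcntF]
        rw [pv_fold_minus_inr]
        simp only [List.nil_append]
        congr 2
        rw [PySem.List.foldl_append_eq_flatMap, List.nil_append, pvFlat, List.flatMap_assoc]
        refine List.flatMap_congr ?_
        intro d hd
        fin_cases hd
        · rw [show PySem.Int.toChars (pyIntOfChar '1' - 1) = ['0'] from by decide,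
              PySem.List.pyRepeat_singleton, pv_chars_count_singleton,
              pv_flatMap_replicate _ _ '1' '0' (by decide)]
          simp
        · rw [show PySem.Int.toChars (pyIntOfChar '3' - 1) = ['2'] from by decide,
              PySem.List.pyRepeat_singleton, pv_chars_count_singleton,
              pv_flatMap_replicate _ _ '3' '2' (by decide)]
          simp
        · rw [show PySem.Int.toChars (pyIntOfChar '5' - 1) = ['4'] from by decide,
              PySem.List.pyRepeat_singleton, pv_chars_count_singleton,
              pv_flatMap_replicate _ _ '5' '4' (by decide)]
          simp
        · rw [show PySem.Int.toChars (pyIntOfChar '7' - 1) = ['6'] from by decide,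
              PySem.List.pyRepeat_singleton, pv_chars_count_singleton,
              pv_flatMap_replicate _ _ '7' '6' (by decide)]
          simp
        · rw [show PySem.Int.toChars (pyIntOfChar '9' - 1) = ['8'] from by decide,
              PySem.List.pyRepeat_singleton, pv_chars_count_singleton,
              pv_flatMap_replicate _ _ '9' '8' (by decide)]
          simp
      · have hcond : PySem.List.pyGet? (pvFlat s) 0 = some '1' := (pv_flat_head s).mpr hc1
        have hcntT : (PySem.Chars.count s ['1'] ≠ 0) = True := by
          rw [pv_chars_count_singleton]; simp [hc1]
        simp only [hcond, ↓reduceIte, hcntT]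
        rw [pv_foldl_const _ _ hemp]
    · -- add component
      congr 2
      rw [PySem.List.foldl_append_eq_flatMap, List.nil_append,
          PySem.List.foldl_append_eq_flatMap, List.nil_append, pvFlat, List.flatMap_assoc]
      refine List.flatMap_congr ?_
      intro d hd
      fin_cases hd
      · rw [show PySem.Int.toChars (PySem.Int.mod (pyIntOfChar '1' + 1) 10) = ['2'] from by decide,
            PySem.List.pyRepeat_singleton, pv_chars_count_singleton,
            pv_flatMap_replicate _ _ '1' '2' (by decide)]
        simp
      · rw [show PySem.Int.toChars (PySem.Int.mod (pyIntOfChar '3' + 1) 10) = ['4'] from by decide,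
            PySem.List.pyRepeat_singleton, pv_chars_count_singleton,
            pv_flatMap_replicate _ _ '3' '4' (by decide)]
        simp
      · rw [show PySem.Int.toChars (PySem.Int.mod (pyIntOfChar '5' + 1) 10) = ['6'] from by decide,
            PySem.List.pyRepeat_singleton, pv_chars_count_singleton,
            pv_flatMap_replicate _ _ '5' '6' (by decide)]
        simp
      · rw [show PySem.Int.toChars (PySem.Int.mod (pyIntOfChar '7' + 1) 10) = ['8'] from by decide,
            PySem.List.pyRepeat_singleton, pv_chars_count_singleton,
            pv_flatMap_replicate _ _ '7' '8' (by decide)]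
        simp
      · rw [show PySem.Int.toChars (PySem.Int.mod (pyIntOfChar '9' + 1) 10) = ['0'] from by decide,
            PySem.List.pyRepeat_singleton, pv_chars_count_singleton,
            pv_flatMap_replicate _ _ '9' '0' (by decide)]
        simp
-- ===== VERDICT (by name: the statement is the Claim_ definition above) =====
theorem f_spec : Claim_equal_f := by
  intro n _ hpre
  unfold Spec_f
  exact f_spec_aux n hpre
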